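-- pv_equiv track=rewrite | github.com/herbertskyper/NeuTracer | analyzer/compressed-sensing/main.py | select_method
-- ===== SOURCE A (Python) =====
-- def select_method(groups):
--     # 规则1: 检查是否存在单个周期组包含大量指标
--     for cycle_group in groups:
--         for period, metrics in cycle_group.items():
--             if period != 'non-periodic' and len(metrics) >= 15:
--                 return "detect_dvd"
--
--     # 规则2: 检查强周期组数量（指标数≥4）
--     strong_group_count = 0
--
--     for cycle_group in groups:
--         for period, metrics in cycle_group.items():
--             if period == 'non-periodic':
--                 continue
--
--             # 规则2: 强周期组
--             if len(metrics) >= 4: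
--                 strong_group_count += 1
--
--     # 决策逻辑
--     if strong_group_count >= 3 :
--         return "detect_dvd"
--
--     return "detect"
-- ===== SOURCE B (Python) =====
-- def select_method(groups):
--     saw_big = False
--     strong_group_count = 0
--     for cycle_group in groups:
--         for period, metrics in cycle_group.items():
--             if period == 'non-periodic':
--                 continue
--             n = len(metrics)
--             if n >= 15:
--                 saw_big = True
--             if n >= 4:
--                 strong_group_count += 1
--     if saw_big or strong_group_count >= 3:
--         return "detect_dvd"
--     return "detect"
-- ===== Notes on version B (the rewrite author's own statement) =====
-- stated objective: simpler
-- what changed: Replaces A's two sequential scans (an early-return scan for a >=15 group, then a counting scan) with a single pass that accumulates both a boolean flag and the strong-group count, deciding once at the end.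
import Mathlib
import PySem

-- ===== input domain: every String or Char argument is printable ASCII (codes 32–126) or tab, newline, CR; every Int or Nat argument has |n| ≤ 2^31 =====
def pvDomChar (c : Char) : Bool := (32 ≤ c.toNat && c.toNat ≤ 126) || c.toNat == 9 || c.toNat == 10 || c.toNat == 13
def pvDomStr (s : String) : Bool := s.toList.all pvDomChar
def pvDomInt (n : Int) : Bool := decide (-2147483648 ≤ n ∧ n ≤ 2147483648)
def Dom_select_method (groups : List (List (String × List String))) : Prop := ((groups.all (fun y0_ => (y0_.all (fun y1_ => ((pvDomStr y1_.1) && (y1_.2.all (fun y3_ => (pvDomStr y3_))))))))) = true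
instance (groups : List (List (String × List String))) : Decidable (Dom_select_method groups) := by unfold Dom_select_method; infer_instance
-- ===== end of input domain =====

-- B collapses A's two sequential scans into one pass accumulating a flag and a count (same return value; simpler decomposition).


-- ===== PORT A =====
-- rule 1: early-return scan — 'return "detect_dvd"' as soon as a non-'non-periodic' item has ≥ 15 metrics
def aHot (p : String × List String) : Bool := (p.1 != "non-periodic") && decide (15 ≤ p.2.length)

-- rule 2: counting pass over strong groups (≥ 4 metrics)
def aCount (acc : Nat) (p : String × List String) : Nat :=
  if p.1 == "non-periodic" then acc
  else if 4 ≤ p.2.length then acc + 1 else acc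

def select_method (groups : List (List (String × List String))) : String :=
  if groups.any (fun g => g.any aHot) then "detect_dvd"
  else
    let strong_group_count : Nat :=
      groups.foldl (fun acc g => g.foldl aCount acc) 0
    if 3 ≤ strong_group_count then "detect_dvd" else "detect"

-- ===== PORT B =====
-- one pass: state = (saw_big flag, strong_group_count)
def bStep (s : Bool × Nat) (p : String × List String) : Bool × Nat :=
  if p.1 == "non-periodic" then s
  else
    let n := p.2.length
    ((if 15 ≤ n then true else s.1), (if 4 ≤ n then s.2 + 1 else s.2))

def select_method_alt (groups : List (List (String × List String))) : String :=
  let s := groups.foldl (fun s g => g.foldl bStep s) (false, 0)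
  if s.1 || decide (3 ≤ s.2) then "detect_dvd" else "detect"

-- ===== PRECONDITION & SPEC =====
def Spec_select_method (groups : List (List (String × List String))) (out : String) : Prop := out = select_method_alt groups
instance (groups : List (List (String × List String))) (out : String) : Decidable (Spec_select_method groups out) := by unfold Spec_select_method; infer_instance

-- ===== CLAIM (what is proved, stated in full; the proofs are below) =====
def Claim_equal_select_method : Prop := ∀ (groups : List (List (String × List String))), Dom_select_method groups → Spec_select_method groups (select_method groups)

-- ===== LEMMAS AND PROOFS =====

-- the one-pass step decomposes into A's two per-item computations
lemma bStep_inner (g : List (String × List String)) (s : Bool × Nat) :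
    g.foldl bStep s = (s.1 || g.any aHot, g.foldl aCount s.2) := by
  induction g generalizing s with
  | nil => simp
  | cons p t ih =>
      simp only [List.foldl, List.any_cons, ih]
      unfold bStep aHot aCount
      by_cases h : p.1 = "non-periodic"
      · simp [h]
      · obtain ⟨b, n⟩ := s
        by_cases h15 : 15 ≤ p.2.length <;> by_cases h4 : 4 ≤ p.2.length <;>
          simp [h, h15, h4]

lemma bStep_outer (groups : List (List (String × List String))) (s : Bool × Nat) :
    groups.foldl (fun s g => g.foldl bStep s) s =
      (s.1 || groups.any (fun g => g.any aHot),
       groups.foldl (fun acc g => g.foldl aCount acc) s.2) := by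
  induction groups generalizing s with
  | nil => simp
  | cons g t ih =>
      rw [List.foldl_cons, bStep_inner, ih]
      simp [Bool.or_assoc]

-- ===== VERDICT (by name: the statement is the Claim_ definition above) =====
theorem select_method_spec : Claim_equal_select_method := by
  intro groups _
  unfold Spec_select_method select_method select_method_alt
  simp only [bStep_outer, Bool.false_or]
  by_cases h : groups.any (fun g => g.any aHot) <;> simp [h]
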